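-- pv_equiv track=rewrite | github.com/Cedian03/advent-of-code | 2024/06.py | parse
-- ===== SOURCE A (Python) =====
-- Map = list[list[bool]]
--
-- def parse(input: str) -> tuple[Map, int, int, int, int]:
--     map = []
--     sx = None
--     sy = None
--     for y, line in enumerate(input.splitlines()):
--         row = []
--         for x, char in enumerate(line):
--             if char == "^":
--                 sx = x
--                 sy = y
--             row.append(char == "#")
--         map.append(row)
--
--     assert sx is not None
--     assert sy is not None
--
--     return (map, len(map[0]), len(map), sx, sy)
-- ===== SOURCE B (Python) =====
-- Map = list[list[bool]]
--
-- def parse(input: str) -> tuple[Map, int, int, int, int]: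
--     lines = input.splitlines()
--     map = [[char == "#" for char in line] for line in lines]
--
--     # The start is the LAST '^' in reading order, i.e. at the highest flat index.
--     p = input.rfind("^")
--     assert p >= 0
--
--     # Split only the prefix ending at that '^': its line count and the length of
--     # its last (partial) line give sy and sx directly.
--     upto = input[: p + 1].splitlines()
--     sy = len(upto) - 1
--     sx = len(upto[-1]) - 1
--
--     return (map, len(map[0]), len(map), sx, sy)
-- ===== Notes on version B (the rewrite author's own statement) =====
-- stated objective: alternative
-- what changed: B never searches within lines: a single global rfind gives the flat index p of the last '^', and splitlines of the prefix input[:p+1] yields sy = number of lines - 1 and sx = length of its last partial line - 1, replacing A's fused per-character scan that overwrites (sx, sy) at every occurrence.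
import Mathlib
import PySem

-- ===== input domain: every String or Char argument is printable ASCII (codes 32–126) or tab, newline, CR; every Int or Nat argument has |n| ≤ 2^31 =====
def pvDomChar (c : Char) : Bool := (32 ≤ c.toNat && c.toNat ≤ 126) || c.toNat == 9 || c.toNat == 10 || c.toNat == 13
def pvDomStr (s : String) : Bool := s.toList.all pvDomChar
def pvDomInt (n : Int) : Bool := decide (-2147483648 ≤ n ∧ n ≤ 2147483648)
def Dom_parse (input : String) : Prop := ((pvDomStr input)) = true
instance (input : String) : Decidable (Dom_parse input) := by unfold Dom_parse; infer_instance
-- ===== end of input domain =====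

-- B locates the start ONCE globally: rfind gives the flat index of the last '^', and splitlines of
-- the prefix up to it yields (sx, sy) arithmetically — no per-line search (objective: alternative).
-- Both versions raise AssertionError when the input contains no '^' (excluded by Pre_parse; the
-- ports return a junk tuple there).

-- ===== PORT A =====
-- len(map[0]) is ported as (headD []).length: whenever the asserts pass a '^' was seen, so map is
-- nonempty and headD [] is exactly map[0].
def parse (input : String) : List (List Bool) × Int × Int × Int × Int :=
  let st := (PySem.List.enumerate (PySem.Str.splitlines input)).foldl
    (fun (st : List (List Bool) × Option Int × Option Int) (yl : Int × String) =>
      let inner := (PySem.List.enumerate yl.2.toList).foldl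
        (fun (st2 : List Bool × Option Int × Option Int) (xc : Int × Char) =>
          let s := if xc.2 = '^' then (some xc.1, some yl.1) else (st2.2.1, st2.2.2)
          (st2.1 ++ [xc.2 == '#'], s.1, s.2))
        (([] : List Bool), st.2.1, st.2.2)
      (st.1 ++ [inner.1], inner.2.1, inner.2.2))
    (([] : List (List Bool)), none, none)
  match st.2.1, st.2.2 with
  | some sx, some sy => (st.1, ((st.1.headD []).length : Int), (st.1.length : Int), sx, sy)
  | _, _ => ([], 0, 0, 0, 0)

-- ===== PORT B =====
-- 'assert p >= 0' failing and the (unreachable when '^' is present) upto[-1] IndexError return the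
-- same junk tuple as A's port; both lie outside Pre_parse.
def parse_alt (input : String) : List (List Bool) × Int × Int × Int × Int :=
  let lines := PySem.Str.splitlines input
  let map := lines.map (fun line => line.toList.map (fun c => c == '#'))
  let p := PySem.Str.rfind input "^"
  if p < 0 then ([], 0, 0, 0, 0)
  else
    let upto := PySem.Str.splitlines (PySem.Str.slice input none (some (p + 1)))
    match PySem.List.pyGet? upto (-1) with
    | none => ([], 0, 0, 0, 0)
    | some lastLine =>
      (map, ((map.headD []).length : Int), (map.length : Int),
       (PySem.Str.len lastLine : Int) - 1, (upto.length : Int) - 1)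

-- ===== PRECONDITION & SPEC =====
-- Pre_parse: the input contains a '^'; otherwise Python A (and B) fail their assert (AssertionError).
def Pre_parse (input : String) : Prop := '^' ∈ input.toList
instance (input : String) : Decidable (Pre_parse input) := by unfold Pre_parse; infer_instance
def pvWitness_parse : String := "^"
def Spec_parse (input : String) (out : List (List Bool) × Int × Int × Int × Int) : Prop := out = parse_alt input
instance (input : String) (out : List (List Bool) × Int × Int × Int × Int) : Decidable (Spec_parse input out) := by unfold Spec_parse; infer_instance

-- ===== CLAIM (what is proved, stated in full; the proofs are below) =====
def Claim_equal_parse : Prop := ∀ (input : String), Dom_parse input → Pre_parse input → Spec_parse input (parse input)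

-- ===== LEMMAS AND PROOFS =====

-- index (from the front) of the LAST occurrence of c in a list, or none
def lastC (c : Char) : List Char → Option Nat
  | [] => none
  | x :: xs =>
    match lastC c xs with
    | some j => some (j + 1)
    | none => if x = c then some 0 else none

-- (sx, sy) of the last line (and within it the last position) holding '^', over the split lines
def lastHitC : List (List Char) → Option (Nat × Nat)
  | [] => none
  | l :: ls =>
    match lastHitC ls with
    | some (x, y) => some (x, y + 1)
    | none =>
      match lastC '^' l with
      | some j => some (j, 0)
      | none => none

def lastHitS : List String → Option (Nat × Nat)
  | [] => none
  | l :: ls =>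
    match lastHitS ls with
    | some (x, y) => some (x, y + 1)
    | none =>
      match lastC '^' l.toList with
      | some j => some (j, 0)
      | none => none

-- Python's line-break predicate (the one inside PySem.Chars.splitlines)
def isBrk (c : Char) : Bool :=
  decide (c.toNat = 10) || decide (c.toNat = 13) || decide (c.toNat = 11) || decide (c.toNat = 12) ||
  decide (c.toNat = 28) || decide (c.toNat = 29) || decide (c.toNat = 30) || decide (c.toNat = 133) ||
  decide (c.toNat = 8232) || decide (c.toNat = 8233)

-- prepend a pending chunk (reversed) onto a line list, as splitlines.go's cur does
def glue (cur : List Char) (L : List (List Char)) : List (List Char) :=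
  if cur = [] then L
  else match L with
  | [] => [cur.reverse]
  | l :: ls => (cur.reverse ++ l) :: ls

-- a valid first line-break unit before X
def brOK (br X : List Char) : Prop :=
  (∃ c, br = [c] ∧ isBrk c = true ∧ (c = '\r' → X.head? ≠ some '\n')) ∨ br = ['\r', '\n']

theorem lastC_eq_none_iff (c : Char) (l : List Char) : lastC c l = none ↔ c ∉ l := by
  induction l with
  | nil => simp [lastC]
  | cons x xs ih =>
    simp only [lastC]
    cases hx : lastC c xs with
    | some j =>
      rw [hx] at ih
      simp only [List.mem_cons]
      constructor
      · intro h; simp at h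
      · intro h; exact absurd (ih.mpr (fun hm => h (Or.inr hm))) (by simp)
    | none =>
      rw [hx] at ih
      by_cases hxc : x = c
      · constructor
        · intro h; rw [if_pos hxc] at h; simp at h
        · intro h; exact absurd (hxc ▸ List.mem_cons_self) h
      · rw [if_neg hxc]
        simp only [List.mem_cons]
        constructor
        · intro _ h
          rcases h with h | h
          · exact hxc h.symm
          · exact (ih.mp rfl) h
        · intro _; trivial

theorem lastC_lt_length (c : Char) (l : List Char) (p : Nat) (h : lastC c l = some p) :
    p < l.length := by
  induction l generalizing p with
  | nil => simp [lastC] at h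
  | cons x xs ih =>
    simp only [lastC] at h
    cases hx : lastC c xs with
    | some j =>
      rw [hx] at h
      have hj := ih j hx
      simp only [Option.some.injEq] at h
      simp only [List.length_cons]
      omega
    | none =>
      rw [hx] at h
      by_cases hxc : x = c
      · rw [if_pos hxc] at h
        simp only [Option.some.injEq] at h
        simp only [List.length_cons]
        omega
      · rw [if_neg hxc] at h; exact absurd h (by simp)

theorem lastC_append (c : Char) (u v : List Char) :
    lastC c (u ++ v) =
      match lastC c v with
      | some j => some (u.length + j)
      | none => lastC c u := by
  induction u with
  | nil => cases hv : lastC c v <;> simp [hv, lastC]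
  | cons x xs ih =>
    simp only [List.cons_append, lastC, ih]
    cases lastC c v with
    | some j => cases lastC c xs <;> simp <;> omega
    | none =>
      cases hx : lastC c xs with
      | some j => simp
      | none => simp

theorem go_eq_lastC (cs : List Char) (c : Char) (k : Nat) :
    PySem.Chars.rfind.go cs [c] k =
      match lastC c (cs.take (k + 1)) with
      | some j => (j : Int)
      | none => -1 := by
  induction k with
  | zero =>
    simp only [PySem.Chars.rfind.go]
    cases cs with
    | nil => simp [List.isPrefixOf, lastC]
    | cons x xs =>
      by_cases h : x = c
      · simp [List.isPrefixOf, lastC, h]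
      · simp only [List.take_succ_cons, List.take_zero, List.isPrefixOf, lastC, beq_iff_eq,
          Bool.and_true, if_neg h]
        rw [if_neg (fun h' => h h'.symm)]
  | succ k ih =>
    have hgo : PySem.Chars.rfind.go cs [c] (k + 1) =
        if [c].isPrefixOf (cs.drop (k + 1)) then ((k + 1 : Nat) : Int)
        else PySem.Chars.rfind.go cs [c] k := by
      simp [PySem.Chars.rfind.go]
    rw [hgo]
    by_cases hlen : k + 1 < cs.length
    · have htake : cs.take (k + 2) = cs.take (k + 1) ++ [cs[k + 1]] := by
        rw [List.take_add_one, List.getElem?_eq_getElem hlen]; rfl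
      have hd : cs.drop (k + 1) = cs[k + 1] :: cs.drop (k + 2) := by
        rw [List.drop_eq_getElem_cons hlen]
      rw [htake, lastC_append, hd]
      by_cases h : cs[k + 1] = c
      · simp [List.isPrefixOf, h, lastC, List.length_take, Nat.min_eq_left (Nat.le_of_lt hlen)]
      · simp only [List.isPrefixOf, beq_iff_eq, Bool.and_true]
        rw [if_neg (fun h' => h h'.symm), ih]
        have hnone : lastC c [cs[k+1]] = none := by simp [lastC, h]
        rw [hnone]
    · have h1 : cs.length ≤ k + 1 := Nat.le_of_not_lt hlen
      have ht2 : cs.take (k + 2) = cs := List.take_of_length_le (Nat.le_trans h1 (by omega))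
      have ht1 : cs.take (k + 1) = cs := List.take_of_length_le h1
      have hne : List.isPrefixOf [c] (cs.drop (k + 1)) = false := by
        rw [List.drop_eq_nil_of_le h1]; rfl
      rw [hne, if_neg (by simp), ih, ht1, ht2]

theorem rfind_single (cs : List Char) (c : Char) :
    PySem.Chars.rfind cs [c] =
      match lastC c cs with
      | some j => (j : Int)
      | none => -1 := by
  show PySem.Chars.rfind.go cs [c] cs.length = _
  rw [go_eq_lastC, List.take_of_length_le (by omega)]

theorem glue_cons (c : Char) (cur : List Char) (L : List (List Char)) :
    glue (c :: cur) L = glue cur (glue [c] L) := by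
  cases L with
  | nil => cases cur <;> simp [glue]
  | cons l ls => cases cur <;> simp [glue]

theorem go_nil (isB : Char → Bool) (cur : List Char) (acc : List (List Char)) :
    PySem.Chars.splitlines.go isB [] cur acc =
      if cur.isEmpty then acc.reverse else (cur.reverse :: acc).reverse := rfl

theorem go_crlf (isB : Char → Bool) (rest cur : List Char) (acc : List (List Char)) :
    PySem.Chars.splitlines.go isB ('\r' :: '\n' :: rest) cur acc =
      PySem.Chars.splitlines.go isB rest [] (cur.reverse :: acc) := rfl

theorem go_cons (isB : Char → Bool) (c : Char) (rest cur : List Char) (acc : List (List Char))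
    (h : ¬(c = '\r' ∧ rest.head? = some '\n')) :
    PySem.Chars.splitlines.go isB (c :: rest) cur acc =
      if isB c then PySem.Chars.splitlines.go isB rest [] (cur.reverse :: acc)
      else PySem.Chars.splitlines.go isB rest (c :: cur) acc := by
  rw [PySem.Chars.splitlines.go.eq_def]
  split
  · rename_i heq; cases heq
  · rename_i heq
    injection heq with h1 h2
    exact absurd ⟨h1, by rw [h2]; rfl⟩ h
  · rename_i heq
    injection heq with h1 h2
    subst h1; subst h2; rfl

theorem glue_nil (L : List (List Char)) : glue [] L = L := by simp [glue]

theorem glue_cons_nil (cur : List Char) (L : List (List Char)) :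
    glue cur ([] :: L) = cur.reverse :: L := by
  cases cur <;> simp [glue]

theorem go_spec (isB : Char → Bool) : ∀ (n : Nat) (s : List Char), s.length ≤ n →
    ∀ cur acc, PySem.Chars.splitlines.go isB s cur acc =
      acc.reverse ++ glue cur (PySem.Chars.splitlines.go isB s [] []) := by
  intro n
  induction n with
  | zero =>
    intro s hs cur acc
    have : s = [] := List.eq_nil_of_length_eq_zero (Nat.le_zero.mp hs)
    subst this
    rw [go_nil, go_nil]
    cases cur <;> simp [glue]
  | succ n ih =>
    intro s hs cur acc
    cases s with
    | nil =>
      rw [go_nil, go_nil]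
      cases cur <;> simp [glue]
    | cons c rest =>
      by_cases hcr : c = '\r' ∧ rest.head? = some '\n'
      · obtain ⟨hc, hh⟩ := hcr
        subst hc
        cases rest with
        | nil => simp at hh
        | cons d rest' =>
          simp only [List.head?_cons, Option.some.injEq] at hh
          subst hh
          rw [go_crlf, go_crlf]
          have hr : rest'.length ≤ n := by simp at hs; omega
          rw [ih rest' hr [] (cur.reverse :: acc), ih rest' hr [] ([].reverse :: [])]
          simp only [glue_nil, List.reverse_cons, List.reverse_nil, List.nil_append,
            List.singleton_append]
          rw [glue_cons_nil]
          simp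
      · rw [go_cons isB c rest cur acc hcr, go_cons isB c rest [] [] hcr]
        have hr : rest.length ≤ n := by simp at hs; omega
        by_cases hb : isB c
        · rw [if_pos hb, if_pos hb]
          rw [ih rest hr [] (cur.reverse :: acc), ih rest hr [] ([].reverse :: [])]
          simp only [glue_nil, List.reverse_cons, List.reverse_nil, List.nil_append,
            List.singleton_append]
          rw [glue_cons_nil]
          simp
        · rw [if_neg hb, if_neg hb]
          rw [ih rest hr (c :: cur) acc, ih rest hr [c] []]
          rw [glue_cons]
          simp

theorem sl_eq_go (s : List Char) :
    PySem.Chars.splitlines s = PySem.Chars.splitlines.go isBrk s [] [] := rfl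

theorem sl_nil : PySem.Chars.splitlines [] = [] := by decide

theorem sl_cons_nonbrk (c : Char) (rest : List Char) (h : isBrk c = false) :
    PySem.Chars.splitlines (c :: rest) = glue [c] (PySem.Chars.splitlines rest) := by
  have hcr : ¬(c = '\r' ∧ rest.head? = some '\n') := by
    rintro ⟨hc, -⟩
    subst hc
    simp [isBrk] at h
  rw [sl_eq_go, sl_eq_go, go_cons isBrk c rest [] [] hcr, if_neg (by simp [h]),
    go_spec isBrk rest.length rest le_rfl [c] []]
  simp

theorem sl_cons_brk (c : Char) (rest : List Char) (h : isBrk c = true)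
    (h2 : c = '\r' → rest.head? ≠ some '\n') :
    PySem.Chars.splitlines (c :: rest) = [] :: PySem.Chars.splitlines rest := by
  have hcr : ¬(c = '\r' ∧ rest.head? = some '\n') := by
    rintro ⟨hc, hh⟩
    exact h2 hc hh
  rw [sl_eq_go, sl_eq_go, go_cons isBrk c rest [] [] hcr, if_pos (by simp [h]),
    go_spec isBrk rest.length rest le_rfl [] ([].reverse :: [])]
  simp only [List.reverse_nil, List.reverse_cons, List.nil_append, glue_nil,
    List.singleton_append]

theorem sl_crlf (rest : List Char) :
    PySem.Chars.splitlines ('\r' :: '\n' :: rest) = [] :: PySem.Chars.splitlines rest := by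
  rw [sl_eq_go, sl_eq_go, go_crlf,
    go_spec isBrk rest.length rest le_rfl [] ([].reverse :: [])]
  simp only [List.reverse_nil, List.reverse_cons, List.nil_append, glue_nil,
    List.singleton_append]

theorem sl_brk_unit (br X : List Char) (h : brOK br X) :
    PySem.Chars.splitlines (br ++ X) = [] :: PySem.Chars.splitlines X := by
  rcases h with ⟨c, rfl, hc, h2⟩ | rfl
  · exact sl_cons_brk c X hc (fun hr hh => h2 hr hh)
  · exact sl_crlf X

theorem sl_split (a br X : List Char) (ha : ∀ c ∈ a, isBrk c = false) (hbr : brOK br X) :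
    PySem.Chars.splitlines (a ++ (br ++ X)) = a :: PySem.Chars.splitlines X := by
  induction a with
  | nil => simpa using sl_brk_unit br X hbr
  | cons c a' ih =>
    rw [List.cons_append, sl_cons_nonbrk c _ (ha c List.mem_cons_self),
      ih (fun d hd => ha d (List.mem_cons_of_mem c hd))]
    simp [glue]

theorem sl_nobreak (a : List Char) (h0 : a ≠ []) (ha : ∀ c ∈ a, isBrk c = false) :
    PySem.Chars.splitlines a = [a] := by
  induction a with
  | nil => exact absurd rfl h0
  | cons c a' ih =>
    rw [sl_cons_nonbrk c a' (ha c List.mem_cons_self)]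
    cases ha' : a' with
    | nil => simp [glue, sl_nil]
    | cons d a'' =>
      rw [← ha', ih (by simp [ha']) (fun d hd => ha d (List.mem_cons_of_mem c hd))]
      simp [glue]

theorem sl_ne_nil (X : List Char) (h : X ≠ []) : PySem.Chars.splitlines X ≠ [] := by
  cases X with
  | nil => exact absurd rfl h
  | cons c rest =>
    by_cases hcr : c = '\r' ∧ rest.head? = some '\n'
    · obtain ⟨hc, hh⟩ := hcr
      subst hc
      cases rest with
      | nil => simp at hh
      | cons d rest' =>
        simp only [List.head?_cons, Option.some.injEq] at hh
        subst hh
        rw [sl_crlf]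
        simp
    · by_cases hb : isBrk c
      · rw [sl_cons_brk c rest hb (fun h1 h2 => hcr ⟨h1, h2⟩)]; simp
      · rw [sl_cons_nonbrk c rest (by simp [hb])]
        cases PySem.Chars.splitlines rest <;> simp [glue]

-- decomposition: break-free, or first break unit
theorem decompose (cs : List Char) :
    (∀ c ∈ cs, isBrk c = false) ∨
    ∃ a br rest, cs = a ++ (br ++ rest) ∧ (∀ c ∈ a, isBrk c = false) ∧ brOK br rest := by
  induction cs with
  | nil => left; simp
  | cons c rest ih =>
    by_cases hb : isBrk c
    · right
      by_cases hcr : c = '\r' ∧ rest.head? = some '\n'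
      · obtain ⟨hc, hh⟩ := hcr
        subst hc
        cases rest with
        | nil => simp at hh
        | cons d rest' =>
          simp only [List.head?_cons, Option.some.injEq] at hh
          subst hh
          exact ⟨[], ['\r', '\n'], rest', by simp, by simp, Or.inr rfl⟩
      · exact ⟨[], [c], rest, by simp, by simp,
          Or.inl ⟨c, rfl, hb, fun h1 h2 => hcr ⟨h1, h2⟩⟩⟩
    · rcases ih with hall | ⟨a, br, r, heq, ha, hbr⟩
      · left
        intro d hd
        rcases List.mem_cons.mp hd with rfl | hd
        · simpa using hb
        · exact hall d hd
      · right
        exact ⟨c :: a, br, r, by simp [heq], fun d hd => by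
          rcases List.mem_cons.mp hd with rfl | hd
          · simpa using hb
          · exact ha d hd, hbr⟩

theorem flatten_mem_aux : ∀ (n : Nat) (X : List Char), X.length ≤ n →
    ∀ l ∈ PySem.Chars.splitlines X, ∀ c ∈ l, c ∈ X := by
  intro n
  induction n with
  | zero =>
    intro X hX l hl
    have : X = [] := List.eq_nil_of_length_eq_zero (Nat.le_zero.mp hX)
    subst this
    rw [sl_nil] at hl
    simp at hl
  | succ n ih =>
    intro X hX l hl c hc
    rcases decompose X with hall | ⟨a, br, rest, rfl, ha, hbr⟩
    · by_cases hX0 : X = []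
      · subst hX0; rw [sl_nil] at hl; simp at hl
      · rw [sl_nobreak X hX0 hall] at hl
        simp only [List.mem_singleton] at hl
        subst hl
        exact hc
    · have hbrl : 1 ≤ br.length := by
        rcases hbr with ⟨e, rfl, -, -⟩ | rfl <;> simp
      rw [sl_split a br rest ha hbr] at hl
      rcases List.mem_cons.mp hl with rfl | hl
      · simp [hc]
      · have hr : rest.length ≤ n := by
          simp only [List.length_append] at hX
          omega
        have := ih rest hr l hl c hc
        simp [this]

theorem flatten_mem (X : List Char) (l : List Char) (hl : l ∈ PySem.Chars.splitlines X)
    (c : Char) (hc : c ∈ l) : c ∈ X :=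
  flatten_mem_aux X.length X le_rfl l hl c hc

theorem lastHitC_eq_none_of (L : List (List Char)) (h : ∀ l ∈ L, '^' ∉ l) :
    lastHitC L = none := by
  induction L with
  | nil => rfl
  | cons l ls ih =>
    simp only [lastHitC]
    rw [ih (fun m hm => h m (List.mem_cons_of_mem l hm)),
      (lastC_eq_none_iff '^' l).mpr (h l List.mem_cons_self)]

theorem lastHitC_none (X : List Char) (h : '^' ∉ X) :
    lastHitC (PySem.Chars.splitlines X) = none :=
  lastHitC_eq_none_of _ (fun l hl hc => h (flatten_mem X l hl '^' hc))

-- main correspondence between flat last-'^' position and line coordinates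
theorem main_lemma (cs : List Char) (p : Nat) (h : lastC '^' cs = some p) :
    ∃ x y, lastHitC (PySem.Chars.splitlines cs) = some (x, y) ∧
      (PySem.Chars.splitlines (cs.take (p + 1))).length = y + 1 ∧
      ∃ ll, (PySem.Chars.splitlines (cs.take (p + 1))).getLast? = some ll ∧ ll.length = x + 1 := by
  induction hn : cs.length using Nat.strong_induction_on generalizing cs p with
  | _ n ihn =>
  subst hn
  rcases decompose cs with hall | ⟨a, br, rest, rfl, ha, hbr⟩
  · -- break-free input: single line
    have hm : '^' ∈ cs := by
      by_contra hm
      rw [(lastC_eq_none_iff '^' cs).mpr hm] at h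
      simp at h
    have hne : cs ≠ [] := List.ne_nil_of_mem hm
    have hp : p < cs.length := lastC_lt_length '^' cs p h
    have htne : cs.take (p + 1) ≠ [] := by
      cases cs with
      | nil => exact absurd rfl hne
      | cons x xs => simp
    have htall : ∀ c ∈ cs.take (p + 1), isBrk c = false :=
      fun c hc => hall c (List.mem_of_mem_take hc)
    refine ⟨p, 0, ?_, ?_, cs.take (p + 1), ?_, ?_⟩
    · rw [sl_nobreak cs hne hall]
      simp only [lastHitC, h]
    · rw [sl_nobreak _ htne htall]; simp
    · rw [sl_nobreak _ htne htall]; rfl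
    · simp [Nat.min_eq_left (by omega : p + 1 ≤ cs.length)]
  · -- cs = a ++ br ++ rest
    have hbrl : 1 ≤ br.length := by
      rcases hbr with ⟨e, rfl, -, -⟩ | rfl <;> simp
    have hbrC : lastC '^' br = none := by
      apply (lastC_eq_none_iff '^' br).mpr
      rcases hbr with ⟨e, rfl, he, -⟩ | rfl
      · intro hmem
        simp only [List.mem_singleton] at hmem
        rw [← hmem] at he
        simp [isBrk] at he
      · decide
    rw [lastC_append, lastC_append] at h
    cases hrest : lastC '^' rest with
    | some p' =>
      -- last '^' lies after the first break
      rw [hrest] at h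
      simp at h
      have hrestne : rest ≠ [] := by
        intro hr; rw [hr] at hrest; simp [lastC] at hrest
      have hlen : rest.length < a.length + (br.length + rest.length) := by omega
      obtain ⟨x, y, h1, h2, ll, h3, h4⟩ := ihn rest.length (by simpa using hlen) rest p' hrest rfl
      have hbrt : brOK br (rest.take (p' + 1)) := by
        rcases hbr with ⟨e, rfl, he, h2e⟩ | rfl
        · refine Or.inl ⟨e, rfl, he, fun hre => ?_⟩
          have : (rest.take (p' + 1)).head? = rest.head? := by
            cases rest with
            | nil => exact absurd rfl hrestne
            | cons x xs => simp
          rw [this]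
          exact h2e hre
        · exact Or.inr rfl
      have ht'ne : rest.take (p' + 1) ≠ [] := by
        cases rest with
        | nil => exact absurd rfl hrestne
        | cons x xs => simp
      have hslt'ne := sl_ne_nil _ ht'ne
      have htake : (a ++ (br ++ rest)).take (p + 1) = a ++ (br ++ rest.take (p' + 1)) := by
        have : p + 1 = a.length + (br.length + (p' + 1)) := by omega
        rw [this, List.take_length_add_append, List.take_length_add_append]
      refine ⟨x, y + 1, ?_, ?_, ll, ?_, h4⟩
      · rw [sl_split a br rest ha hbr]
        simp only [lastHitC, h1]
      · rw [htake, sl_split a br _ ha hbrt]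
        simp [h2]
      · rw [htake, sl_split a br _ ha hbrt]
        rw [show (a :: PySem.Chars.splitlines (rest.take (p' + 1))).getLast? =
            (PySem.Chars.splitlines (rest.take (p' + 1))).getLast? from ?_, h3]
        cases hsl : PySem.Chars.splitlines (rest.take (p' + 1)) with
        | nil => exact absurd hsl hslt'ne
        | cons m ms => exact List.getLast?_cons_cons
    | none =>
      -- last '^' lies in the first line a
      rw [hrest, hbrC] at h
      simp at h
      have hm : '^' ∈ a := by
        by_contra hm
        rw [(lastC_eq_none_iff '^' a).mpr hm] at h
        simp at h
      have hane : a ≠ [] := List.ne_nil_of_mem hm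
      have hp : p < a.length := lastC_lt_length '^' a p h
      have htake : (a ++ (br ++ rest)).take (p + 1) = a.take (p + 1) :=
        List.take_append_of_le_length (by omega)
      have htne : a.take (p + 1) ≠ [] := by
        cases a with
        | nil => exact absurd rfl hane
        | cons x xs => simp
      have htall : ∀ c ∈ a.take (p + 1), isBrk c = false :=
        fun c hc => ha c (List.mem_of_mem_take hc)
      have hrnone : lastHitC (PySem.Chars.splitlines rest) = none :=
        lastHitC_none rest ((lastC_eq_none_iff '^' rest).mp hrest)
      refine ⟨p, 0, ?_, ?_, a.take (p + 1), ?_, ?_⟩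
      · rw [sl_split a br rest ha hbr]
        simp only [lastHitC, hrnone, h]
      · rw [htake, sl_nobreak _ htne htall]; simp
      · rw [htake, sl_nobreak _ htne htall]; rfl
      · simp [Nat.min_eq_left (by omega : p + 1 ≤ a.length)]

theorem lastHitS_eq (L : List String) : lastHitS L = lastHitC (L.map String.toList) := by
  induction L with
  | nil => rfl
  | cons l ls ih => simp only [lastHitS, List.map_cons, lastHitC, ih]

theorem inner_fold_eq (y : Int) (cs : List Char) :
    ∀ (i0 : Int) (row : List Bool) (sx sy : Option Int),
    (PySem.List.enumerate cs i0).foldl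
      (fun (st2 : List Bool × Option Int × Option Int) (xc : Int × Char) =>
        let s := if xc.2 = '^' then (some xc.1, some y) else (st2.2.1, st2.2.2)
        (st2.1 ++ [xc.2 == '#'], s.1, s.2))
      (row, sx, sy)
    = (row ++ cs.map (fun c => c == '#'),
       match lastC '^' cs with
       | some j => (some (i0 + (j : Int)), some y)
       | none => (sx, sy)) := by
  induction cs with
  | nil => intro i0 row sx sy; simp [PySem.List.enumerate, lastC]
  | cons x xs ih =>
    intro i0 row sx sy
    rw [PySem.List.enumerate_cons, List.foldl_cons, ih]
    cases hx : lastC '^' xs with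
    | some j =>
      simp only [lastC, hx]
      by_cases h : x = '^' <;> simp [h] <;> omega
    | none =>
      simp only [lastC, hx]
      by_cases h : x = '^' <;> simp [h]

theorem outer_fold_eq (lines : List String) :
    ∀ (y0 : Int) (mp : List (List Bool)) (sx sy : Option Int),
    (PySem.List.enumerate lines y0).foldl
      (fun (st : List (List Bool) × Option Int × Option Int) (yl : Int × String) =>
        let inner := (PySem.List.enumerate yl.2.toList).foldl
          (fun (st2 : List Bool × Option Int × Option Int) (xc : Int × Char) =>
            let s := if xc.2 = '^' then (some xc.1, some yl.1) else (st2.2.1, st2.2.2)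
            (st2.1 ++ [xc.2 == '#'], s.1, s.2))
          (([] : List Bool), st.2.1, st.2.2)
        (st.1 ++ [inner.1], inner.2.1, inner.2.2))
      (mp, sx, sy)
    = (mp ++ lines.map (fun line => line.toList.map (fun c => c == '#')),
       match lastHitS lines with
       | some (x, y) => (some (x : Int), some (y0 + (y : Int)))
       | none => (sx, sy)) := by
  induction lines with
  | nil => intro y0 mp sx sy; simp [PySem.List.enumerate, lastHitS]
  | cons line rest ih =>
    intro y0 mp sx sy
    rw [PySem.List.enumerate_cons, List.foldl_cons, inner_fold_eq, ih]
    simp only [lastHitS]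
    cases hr : lastHitS rest with
    | some xy =>
      obtain ⟨x, y⟩ := xy
      simp only [List.map_cons, List.nil_append, Prod.mk.injEq]
      refine ⟨by simp, trivial, ?_⟩
      congr 1
      push_cast
      omega
    | none =>
      cases hl : lastC '^' line.toList with
      | some j => simp
      | none => simp

-- ===== VERDICT (by name: the statement is the Claim_ definition above) =====
theorem parse_spec : Claim_equal_parse := by
  intro input _ hpre
  show parse input = parse_alt input
  obtain ⟨pN, hp⟩ : ∃ p, lastC '^' input.toList = some p := by
    cases hl : lastC '^' input.toList with
    | none => exact absurd hpre ((lastC_eq_none_iff _ _).mp hl)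
    | some p => exact ⟨p, rfl⟩
  obtain ⟨x, y, hhit, hlen, ll, hlast, hll⟩ := main_lemma input.toList pN hp
  have hrfind : PySem.Str.rfind input "^" = (pN : Int) := by
    rw [PySem.Str.rfind_eq, show "^".toList = ['^'] from rfl, rfind_single, hp]
  have hslice : (PySem.Str.slice input none (some ((pN : Int) + 1))).toList =
      input.toList.take (pN + 1) := by
    rw [PySem.Str.toList_slice, PySem.Chars.slice_eq_listSlice,
      show ((pN : Int) + 1) = ((pN + 1 : Nat) : Int) by push_cast; ring,
      PySem.List.slice_to_natCast]
  have hupto : (PySem.Str.splitlines (PySem.Str.slice input none (some ((pN : Int) + 1)))).map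
      String.toList = PySem.Chars.splitlines (input.toList.take (pN + 1)) := by
    rw [PySem.Str.splitlines_map_toList, hslice]
  have hulen : (PySem.Str.splitlines (PySem.Str.slice input none
      (some ((pN : Int) + 1)))).length = y + 1 := by
    rw [← List.length_map (f := String.toList), hupto, hlen]
  have hulast : (PySem.Str.splitlines (PySem.Str.slice input none
      (some ((pN : Int) + 1)))).getLast?.map String.toList = some ll := by
    rw [← List.getLast?_map, hupto, hlast]
  obtain ⟨l', hl', hl'toList⟩ : ∃ l', (PySem.Str.splitlines (PySem.Str.slice input none
      (some ((pN : Int) + 1)))).getLast? = some l' ∧ l'.toList = ll := by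
    cases hg : (PySem.Str.splitlines (PySem.Str.slice input none
        (some ((pN : Int) + 1)))).getLast? with
    | none => rw [hg] at hulast; simp at hulast
    | some l' =>
      rw [hg] at hulast
      simp only [Option.map_some, Option.some.injEq] at hulast
      exact ⟨l', rfl, hulast⟩
  unfold parse parse_alt
  rw [outer_fold_eq, lastHitS_eq, PySem.Str.splitlines_map_toList, hhit]
  dsimp only
  rw [hrfind, if_neg (by omega : ¬((pN : Int) < 0))]
  rw [PySem.List.pyGet?_neg_one, hl']
  simp only [List.nil_append]
  refine congrArg _ (congrArg _ (congrArg _ ?_))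
  have h1 : PySem.Str.len l' = ((x : Int) + 1) := by
    rw [PySem.Str.len_eq, hl'toList, hll]; push_cast; ring
  rw [h1, hulen]
  refine Prod.ext ?_ ?_ <;> · show _ = _; push_cast; ring
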